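-- pv_equiv track=rewrite | github.com/susunini/leetcode | Twitter_Anagram_Palindrome.py | is_anagram_pandindrome
-- ===== SOURCE A (Python) =====
-- import collections
--
-- def is_anagram_pandindrome(input_str):
--     """ Check if any anagram of input string is an anagram.
--     https://instant.1point3acres.com/thread/256142/post/2353850
--     """
--     counter = collections.Counter(input_str)
--     num_of_odd = 0
--     for letter, count in counter.items():
--         if count%2:
--             num_of_odd += 1
--         if num_of_odd > 1:
--             return False
--     return True
-- ===== SOURCE B (Python) =====
-- def is_anagram_pandindrome(input_str):
--     """ Check if any anagram of input string is an anagram.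
--     https://instant.1point3acres.com/thread/256142/post/2353850
--     """
--     odd = set()
--     for ch in input_str:
--         if ch in odd:
--             odd.discard(ch)
--         else:
--             odd.add(ch)
--     return len(odd) <= 1
-- ===== Notes on version B (the rewrite author's own statement) =====
-- stated objective: idiomatic
-- what changed: B keeps a live set of characters seen an odd number of times (toggle per character) and checks its size, instead of building a Counter and then scanning its items counting odd counts with an early return.
import Mathlib
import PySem

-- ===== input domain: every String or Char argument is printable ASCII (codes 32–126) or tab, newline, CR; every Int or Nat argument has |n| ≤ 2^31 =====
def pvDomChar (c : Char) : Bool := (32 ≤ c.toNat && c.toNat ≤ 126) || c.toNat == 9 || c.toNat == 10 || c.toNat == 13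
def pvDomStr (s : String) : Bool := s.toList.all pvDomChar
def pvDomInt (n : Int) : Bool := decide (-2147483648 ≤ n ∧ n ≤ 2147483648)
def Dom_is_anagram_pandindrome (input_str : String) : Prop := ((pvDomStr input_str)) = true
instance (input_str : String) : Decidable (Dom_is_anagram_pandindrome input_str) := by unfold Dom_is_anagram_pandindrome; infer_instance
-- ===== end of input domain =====

-- B replaces A's Counter-then-scan-items-for-odd-counts with a single pass keeping a
-- live set of odd-parity characters and checking its size (idiomatic; same cost).

-- ===== PORT A =====
-- the 'for letter, count in counter.items()' loop with its early 'return False'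
def pvALoop : List (Char × Int) → Int → Bool
  | [], _ => true
  | (_, count) :: rest, numOdd =>
    let numOdd' := if PySem.Int.mod count 2 ≠ 0 then numOdd + 1 else numOdd
    if numOdd' > 1 then false else pvALoop rest numOdd'

def is_anagram_pandindrome (input_str : String) : Bool :=
  pvALoop (PySem.Dict.counter input_str.toList).items 0

-- ===== PORT B =====
-- one toggle step of B's loop body: discard if present, else add
def pvToggle (s : PySem.Set Char) (c : Char) : PySem.Set Char :=
  if PySem.Set.contains s c then PySem.Set.discard s c else PySem.Set.add s c

def is_anagram_pandindrome_alt (input_str : String) : Bool :=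
  decide (PySem.Set.len (input_str.toList.foldl pvToggle PySem.Set.empty) ≤ 1)

-- ===== PRECONDITION & SPEC =====
def Spec_is_anagram_pandindrome (input_str : String) (out : Bool) : Prop := out = is_anagram_pandindrome_alt input_str
instance (input_str : String) (out : Bool) : Decidable (Spec_is_anagram_pandindrome input_str out) := by unfold Spec_is_anagram_pandindrome; infer_instance

-- ===== CLAIM (what is proved, stated in full; the proofs are below) =====
def Claim_equal_is_anagram_pandindrome : Prop := ∀ (input_str : String), Dom_is_anagram_pandindrome input_str → Spec_is_anagram_pandindrome input_str (is_anagram_pandindrome input_str)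

-- ===== LEMMAS AND PROOFS =====

-- A's loop over the counter items, started at a numOdd of 0 or 1, counts odd entries
lemma pvALoop_map (l t : List Char) (n : Int) (h0 : 0 ≤ n) (h1 : n ≤ 1) :
    pvALoop (t.map (fun k => (k, (l.count k : Int)))) n
      = decide (n + (t.countP (fun k => decide (l.count k % 2 = 1)) : Int) ≤ 1) := by
  induction t generalizing n with
  | nil =>
    simp only [List.map_nil, pvALoop, List.countP_nil, Nat.cast_zero, add_zero]
    exact (decide_eq_true (by omega)).symm
  | cons k t ih =>
    have hmod : PySem.Int.mod ((l.count k : Nat) : Int) 2 = ((l.count k % 2 : Nat) : Int) := by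
      exact_mod_cast PySem.Int.mod_natCast (l.count k) 2
    simp only [List.map_cons, pvALoop, hmod, List.countP_cons]
    by_cases hodd : l.count k % 2 = 1
    · have hp : decide (l.count k % 2 = 1) = true := decide_eq_true hodd
      have hcond : ((l.count k % 2 : Nat) : Int) ≠ 0 := by simp [hodd]
      rw [if_pos hcond]
      by_cases hn : n + 1 > 1
      · rw [if_pos hn]
        symm; rw [decide_eq_false_iff_not]
        simp [hp]
        omega
      · rw [if_neg hn, ih (n + 1) (by omega) (by omega), decide_eq_decide]
        simp [hp]
        omega
    · have hp : decide (l.count k % 2 = 1) = false := decide_eq_false hodd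
      have h0' : l.count k % 2 = 0 := by omega
      have hcond : ¬ ((l.count k % 2 : Nat) : Int) ≠ 0 := by simp [h0']
      rw [if_neg hcond, if_neg (by omega : ¬ n > 1), ih n h0 h1, decide_eq_decide]
      simp [hp]

-- membership through one toggle step
lemma mem_pvToggle (s : PySem.Set Char) (hs : s.Nodup) (x c : Char) :
    (c ∈ pvToggle s x ↔ ((c ∈ s) ↔ c ≠ x)) ∧ (pvToggle s x).Nodup := by
  unfold pvToggle
  by_cases h : PySem.Set.contains s x = true
  · have hx : x ∈ s := (PySem.Set.contains_iff s x).mp h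
    rw [if_pos h]
    refine ⟨?_, PySem.Set.nodup_discard s x hs⟩
    rw [PySem.Set.mem_discard]
    constructor
    · rintro ⟨h1, h2⟩; tauto
    · intro hiff
      by_cases hc : c = x
      · subst hc; tauto
      · exact ⟨hiff.mpr hc, hc⟩
  · have hx : x ∉ s := by
      intro hm; exact h ((PySem.Set.contains_iff s x).mpr hm)
    rw [if_neg h]
    refine ⟨?_, PySem.Set.nodup_add s x hs⟩
    rw [PySem.Set.mem_add]
    constructor
    · rintro (h1 | h1)
      · refine ⟨fun _ hcx => hx (hcx ▸ h1), fun _ => h1⟩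
      · subst h1; tauto
    · intro hiff
      by_cases hc : c = x
      · right; exact hc
      · left; exact hiff.mpr hc

-- B's fold keeps exactly the characters seen an odd number of times
lemma pvToggle_fold (l : List Char) (s : PySem.Set Char) (hs : s.Nodup) :
    (l.foldl pvToggle s).Nodup ∧
      ∀ c, c ∈ l.foldl pvToggle s ↔ ((c ∈ s) ↔ l.count c % 2 = 0) := by
  induction l generalizing s with
  | nil =>
    refine ⟨hs, fun c => ?_⟩
    simp
  | cons x t ih =>
    obtain ⟨hnd, hmem⟩ := ih (pvToggle s x) (mem_pvToggle s hs x x).2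
    refine ⟨hnd, fun c => ?_⟩
    rw [List.foldl_cons, hmem c, (mem_pvToggle s hs x c).1, List.count_cons]
    by_cases hc : c = x
    · subst hc
      by_cases hcs : c ∈ s
      · simp [hcs]; omega
      · simp [hcs]; omega
    · have hbeq : (x == c) = false := by
        rw [beq_eq_false_iff_ne]; exact fun h => hc h.symm
      simp [hbeq, hc]

-- the two characterisations agree: both tests count the distinct odd-count characters
lemma main_eq (l : List Char) :
    pvALoop (PySem.Dict.counter l).items 0
      = decide (PySem.Set.len (l.foldl pvToggle PySem.Set.empty) ≤ 1) := by
  rw [PySem.Dict.items_counter, pvALoop_map l _ 0 (by omega) (by omega)]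
  obtain ⟨hnd, hmem⟩ := pvToggle_fold l PySem.Set.empty (by simp [PySem.Set.empty])
  have hperm : (l.foldl pvToggle PySem.Set.empty).Perm
      ((PySem.Set.ofList l).filter (fun c => decide (l.count c % 2 = 1))) := by
    rw [List.perm_ext_iff_of_nodup hnd ((PySem.Set.nodup_ofList l).filter _)]
    intro c
    rw [hmem c, List.mem_filter, PySem.Set.mem_ofList]
    constructor
    · intro h
      have hpar : ¬ l.count c % 2 = 0 := by
        intro h0
        have : c ∈ PySem.Set.empty := h.mpr h0
        simp [PySem.Set.empty] at this
      have h2 : c ∈ l := by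
        rw [← List.count_pos_iff]; omega
      exact ⟨h2, by simp; omega⟩
    · rintro ⟨hcl, hodd⟩
      simp only [decide_eq_true_eq] at hodd
      constructor
      · intro h; simp [PySem.Set.empty] at h
      · intro h; omega
  have hlen := hperm.length_eq
  have hlenI : PySem.Set.len (l.foldl pvToggle PySem.Set.empty)
      = (((PySem.Set.ofList l).filter (fun c => decide (l.count c % 2 = 1))).length : Int) := by
    show ((l.foldl pvToggle PySem.Set.empty).length : Int) = _
    exact_mod_cast hlen
  rw [hlenI, decide_eq_decide, List.countP_eq_length_filter]
  omega

-- ===== VERDICT (by name: the statement is the Claim_ definition above) =====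
theorem is_anagram_pandindrome_spec : Claim_equal_is_anagram_pandindrome := by
  intro s _
  unfold Spec_is_anagram_pandindrome is_anagram_pandindrome is_anagram_pandindrome_alt
  exact main_eq s.toList
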